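-- pv_equiv track=rewrite | github.com/Talleyrand-34/basic-cryptography-python | kasiski/kasiski_attack.py | factorize_distances
-- ===== SOURCE A (Python) =====
-- def factorize_distances(distances:list=[]) -> tuple[dict[int, int], dict[int, list[int]]]:
-- 	divisors_counts = {}        # Cuantas veces aparece un factor como factor de distancias
-- 	divisors_per_distances = {} # Factor de cada distacia
--
-- 	# Por cada distancia
-- 	for d in distances:
-- 		divisors = []
--
-- 		# Obtenemos todos los factores del divisor
-- 		for i in range(2, d+1):
-- 			# Si es un factor se añade
-- 			if d % i == 0:
-- 				divisors.append(i)
--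
-- 				# Se incrementa en 1, si el factori se ha repetido
-- 				divisors_counts[i] = divisors_counts.get(i, 0) +1
--
-- 		# Añadimos la distancia factorizada al diccionario
-- 		divisors_per_distances[d] = divisors
--
-- 	return divisors_counts, divisors_per_distances
-- ===== SOURCE B (Python) =====
-- def _divisors(d):
--     # all divisors of d in [2, d], ascending, found in O(sqrt(d))
--     if d < 2:
--         return []
--     small = []
--     large = []
--     i = 1
--     while i * i <= d:
--         if d % i == 0:
--             if i > 1:
--                 small.append(i)
--             j = d // i
--             if j != i and j > 1:
--                 large.append(j)
--         i += 1
--     large.reverse()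
--     return small + large
--
-- def factorize_distances(distances: list = []) -> tuple[dict[int, int], dict[int, list[int]]]:
--     divisors_counts = {}
--     divisors_per_distances = {}
--     for d in distances:
--         divs = _divisors(d)
--         for i in divs:
--             divisors_counts[i] = divisors_counts.get(i, 0) + 1
--         divisors_per_distances[d] = divs
--     return divisors_counts, divisors_per_distances
-- ===== Notes on version B (the rewrite author's own statement) =====
-- stated objective: faster
-- what changed: Divisors of each distance are enumerated by trial division only up to sqrt(d), collecting each small divisor i and its cofactor d//i (cofactors reversed to keep ascending order), instead of scanning every i in 2..d.
import Mathlib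
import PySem

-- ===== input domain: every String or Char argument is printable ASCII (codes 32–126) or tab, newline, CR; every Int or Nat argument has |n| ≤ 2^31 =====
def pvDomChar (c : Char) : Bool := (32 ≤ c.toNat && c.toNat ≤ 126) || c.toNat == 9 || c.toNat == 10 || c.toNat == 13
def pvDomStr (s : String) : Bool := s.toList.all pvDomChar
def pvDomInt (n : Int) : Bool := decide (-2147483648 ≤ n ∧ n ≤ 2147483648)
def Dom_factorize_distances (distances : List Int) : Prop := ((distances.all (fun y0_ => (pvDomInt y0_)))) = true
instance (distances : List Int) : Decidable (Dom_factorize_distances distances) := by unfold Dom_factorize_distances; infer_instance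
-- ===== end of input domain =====

-- B replaces A's full 2..d trial-division scan per distance by a sqrt(d) divisor
-- enumeration (small divisor i plus cofactor d//i); objective: faster.

-- ===== PORT A =====
def factorize_distances (distances : List Int) : (List (Int × Int)) × (List (Int × List Int)) :=
  let st := distances.foldl
    (fun (st : PySem.Dict Int Int × PySem.Dict Int (List Int)) d =>
      let inner := (PySem.List.pyRange 2 (d+1) 1).foldl
        (fun (st2 : List Int × PySem.Dict Int Int) i =>
          if PySem.Int.mod d i == 0 then
            (st2.1 ++ [i], st2.2.insert i (st2.2.getD i 0 + 1))
          else st2)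
        ([], st.1)
      (inner.2, st.2.insert d inner.1))
    (PySem.Dict.empty, PySem.Dict.empty)
  (st.1.items, st.2.items)

-- ===== PORT B =====
-- the while loop of _divisors in Source B
def altDivAux (d i : Int) (small large : List Int) : List Int × List Int :=
  if h : i * i ≤ d then
    if PySem.Int.mod d i == 0 then
      let small' := if 1 < i then small ++ [i] else small
      let j := PySem.Int.floordiv d i
      let large' := if j ≠ i ∧ 1 < j then large ++ [j] else large
      altDivAux d (i+1) small' large'
    else altDivAux d (i+1) small large
  else (small, large)
termination_by (d + 1 - i).toNat
decreasing_by
  all_goals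
    have hi : i ≤ d := by nlinarith [sq_nonneg i, mul_self_nonneg i]
    omega

-- _divisors of Source B
def altDivisors (d : Int) : List Int :=
  if d < 2 then [] else
    let p := altDivAux d 1 [] []
    p.1 ++ p.2.reverse

def factorize_distances_alt (distances : List Int) : (List (Int × Int)) × (List (Int × List Int)) :=
  let st := distances.foldl
    (fun (st : PySem.Dict Int Int × PySem.Dict Int (List Int)) d =>
      let divs := altDivisors d
      (divs.foldl (fun c i => c.insert i (c.getD i 0 + 1)) st.1, st.2.insert d divs))
    (PySem.Dict.empty, PySem.Dict.empty)
  (st.1.items, st.2.items)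

-- ===== PRECONDITION & SPEC =====
def Spec_factorize_distances (distances : List Int) (out : (List (Int × Int)) × (List (Int × List Int))) : Prop := out = factorize_distances_alt distances
instance (distances : List Int) (out : (List (Int × Int)) × (List (Int × List Int))) : Decidable (Spec_factorize_distances distances out) := by unfold Spec_factorize_distances; infer_instance

-- ===== CLAIM (what is proved, stated in full; the proofs are below) =====
def Claim_equal_factorize_distances : Prop := ∀ (distances : List Int), Dom_factorize_distances distances → Spec_factorize_distances distances (factorize_distances distances)

-- ===== LEMMAS AND PROOFS =====

-- A's inner loop over the range splits into the filtered list and a count fold over it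
lemma innerA_eq (d : Int) (l : List Int) : ∀ (ds : List Int) (c : PySem.Dict Int Int),
    l.foldl
      (fun (st2 : List Int × PySem.Dict Int Int) i =>
        if PySem.Int.mod d i == 0 then
          (st2.1 ++ [i], st2.2.insert i (st2.2.getD i 0 + 1))
        else st2)
      (ds, c)
    = (ds ++ l.filter (fun i => PySem.Int.mod d i == 0),
       (l.filter (fun i => PySem.Int.mod d i == 0)).foldl
         (fun c i => c.insert i (c.getD i 0 + 1)) c) := by
  induction l with
  | nil => simp
  | cons x xs ih =>
    intro ds c
    by_cases hx : (PySem.Int.mod d x == 0) = true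
    · simp only [List.foldl_cons, List.filter_cons, if_pos hx, ih, List.append_assoc,
        List.singleton_append]
    · simp only [List.foldl_cons, List.filter_cons, if_neg hx, ih]

-- x = d/(d/x) for a positive divisor
lemma cofactor_eq (d x : Int) (_hx : 0 < x) (hdvd : x ∣ d) : x * (d / x) = d :=
  Int.mul_ediv_cancel' hdvd

-- the key characterisation of the sqrt-enumeration
lemma altDivAux_spec (d : Int) (hd : 2 ≤ d) :
    ∀ (i : Int) (small large : List Int), 1 ≤ i →
    small.Pairwise (· < ·) → large.Pairwise (· > ·) →
    (∀ x, x ∈ small ↔ (1 < x ∧ x < i ∧ x * x ≤ d ∧ x ∣ d)) →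
    (∀ x, x ∈ large ↔ (1 < x ∧ d < x * x ∧ x ≤ d ∧ x ∣ d ∧ d / x < i)) →
    (altDivAux d i small large).1.Pairwise (· < ·) ∧
    (altDivAux d i small large).2.Pairwise (· > ·) ∧
    (∀ x, x ∈ (altDivAux d i small large).1 ↔ (1 < x ∧ x * x ≤ d ∧ x ∣ d)) ∧
    (∀ x, x ∈ (altDivAux d i small large).2 ↔ (1 < x ∧ d < x * x ∧ x ≤ d ∧ x ∣ d)) := by
  intro i small large
  fun_induction altDivAux d i small large with
  | case1 i small large h hmod small' j large' ih =>
    intro hi1 hps hpl hms hml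
    have hi0 : (0:Int) < i := by omega
    have hdvd_i : i ∣ d := by
      rw [PySem.Int.mod_eq_emod_of_pos hi0] at hmod
      exact Int.dvd_of_emod_eq_zero (by simpa using hmod)
    have hjdef : j = d / i := PySem.Int.floordiv_eq_ediv_of_pos hi0
    have hij : i * j = d := by rw [hjdef]; exact Int.mul_ediv_cancel' hdvd_i
    have hj1 : 1 ≤ j := by nlinarith
    have hilej : i ≤ j := by nlinarith
    -- invariants at i+1
    have hps' : small'.Pairwise (· < ·) := by
      show (if 1 < i then small ++ [i] else small).Pairwise (· < ·)
      split_ifs with hii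
      · rw [List.pairwise_append]
        exact ⟨hps, List.pairwise_singleton _ _, fun a ha b hb => by
          obtain ⟨-, hai, -, -⟩ := (hms a).mp ha
          simp at hb; omega⟩
      · exact hps
    have hms' : ∀ x, x ∈ small' ↔ (1 < x ∧ x < i + 1 ∧ x * x ≤ d ∧ x ∣ d) := by
      intro x
      show x ∈ (if 1 < i then small ++ [i] else small) ↔ _
      split_ifs with hii
      · rw [List.mem_append, List.mem_singleton, hms x]
        constructor
        · rintro (⟨h1, h2, h3, h4⟩ | rfl)
          · exact ⟨h1, by omega, h3, h4⟩
          · exact ⟨hii, by omega, h, hdvd_i⟩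
        · rintro ⟨h1, h2, h3, h4⟩
          rcases lt_or_eq_of_le (by omega : x ≤ i) with hlt | rfl
          · exact Or.inl ⟨h1, hlt, h3, h4⟩
          · exact Or.inr rfl
      · rw [hms x]; omega
    have hpl' : large'.Pairwise (· > ·) := by
      show (if j ≠ i ∧ 1 < j then large ++ [j] else large).Pairwise (· > ·)
      split_ifs with hjc
      · rw [List.pairwise_append]
        refine ⟨hpl, List.pairwise_singleton _ _, fun a ha b hb => ?_⟩
        simp only [List.mem_singleton] at hb
        subst hb
        obtain ⟨ha1, haa, had, hadvd, halt⟩ := (hml a).mp ha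
        have ha0 : (0:Int) < a := by omega
        have hay : a * (d / a) = d := Int.mul_ediv_cancel' hadvd
        have hy1 : 1 ≤ d / a := by nlinarith
        show j < a
        by_contra hja
        rw [not_lt] at hja
        have h1 : a * (d / a) ≤ a * (i - 1) :=
          mul_le_mul_of_nonneg_left (by omega) (le_of_lt ha0)
        have h2 : a * (i - 1) ≤ j * (i - 1) :=
          mul_le_mul_of_nonneg_right hja (by omega)
        nlinarith
      · exact hpl
    have hml' : ∀ x, x ∈ large' ↔ (1 < x ∧ d < x * x ∧ x ≤ d ∧ x ∣ d ∧ d / x < i + 1) := by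
      intro x
      show x ∈ (if j ≠ i ∧ 1 < j then large ++ [j] else large) ↔ _
      split_ifs with hjc
      · rw [List.mem_append, List.mem_singleton, hml x]
        constructor
        · rintro (⟨h1, h2, h3, h4, h5⟩ | rfl)
          · exact ⟨h1, h2, h3, h4, by omega⟩
          · have hinej : i ≠ j := fun hh => hjc.1 hh.symm
            have hiltj : i < j := lt_of_le_of_ne hilej hinej
            refine ⟨hjc.2, by nlinarith, by nlinarith, ⟨i, by linarith [hij, mul_comm i j]⟩, ?_⟩
            have : d / j = i := by
              have hji : j * i = d := by rw [mul_comm]; exact hij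
              rw [← hji, Int.mul_ediv_cancel_left _ (by omega : j ≠ 0)]
            omega
        · rintro ⟨h1, h2, h3, h4, h5⟩
          rcases lt_or_ge (d / x) i with hlt | hge
          · exact Or.inl ⟨h1, h2, h3, h4, hlt⟩
          · have hdxi : d / x = i := by omega
            have hxy : x * (d / x) = d := Int.mul_ediv_cancel' h4
            have : x * i = i * j := by rw [← hdxi] at hij ⊢; linarith [hij, hxy]
            have hxj : x = j := by
              have := mul_left_cancel₀ (by omega : (i:Int) ≠ 0) (by linarith [mul_comm x i, this] : i * x = i * j)
              exact this
            exact Or.inr hxj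
      · -- guard failed: j = i, i.e. i*i = d
        have hjne1 : 1 < j := by
          rcases lt_or_eq_of_le hj1 with hh | hh
          · omega
          · exfalso; nlinarith
        have hji : j = i := by tauto
        have hii_d : i * i = d := by rw [← hji] at hij ⊢; omega
        rw [hml x]
        constructor
        · rintro ⟨h1, h2, h3, h4, h5⟩; exact ⟨h1, h2, h3, h4, by omega⟩
        · rintro ⟨h1, h2, h3, h4, h5⟩
          refine ⟨h1, h2, h3, h4, ?_⟩
          rcases lt_or_ge (d / x) i with hlt | hge
          · exact hlt
          · exfalso
            have hdxi : d / x = i := by omega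
            have hxy : x * (d / x) = d := Int.mul_ediv_cancel' h4
            rw [hdxi] at hxy
            have hxi : x = i := by
              have : x * i = i * i := by omega
              have := mul_right_cancel₀ (by omega : (i:Int) ≠ 0) this
              omega
            nlinarith
    exact ih (by omega) hps' hpl' hms' hml'
  | case2 i small large h hmod ih =>
    intro hi1 hps hpl hms hml
    have hi0 : (0:Int) < i := by omega
    have hndvd : ¬ i ∣ d := by
      intro hdvd
      apply hmod
      rw [PySem.Int.mod_eq_emod_of_pos hi0]
      simpa using Int.emod_eq_zero_of_dvd hdvd
    have hms' : ∀ x, x ∈ small ↔ (1 < x ∧ x < i + 1 ∧ x * x ≤ d ∧ x ∣ d) := by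
      intro x
      rw [hms x]
      constructor
      · rintro ⟨h1, h2, h3, h4⟩; exact ⟨h1, by omega, h3, h4⟩
      · rintro ⟨h1, h2, h3, h4⟩
        refine ⟨h1, ?_, h3, h4⟩
        rcases lt_or_ge x i with hlt | hge
        · exact hlt
        · exfalso; exact hndvd (by rwa [(by omega : x = i)] at h4)
    have hml' : ∀ x, x ∈ large ↔ (1 < x ∧ d < x * x ∧ x ≤ d ∧ x ∣ d ∧ d / x < i + 1) := by
      intro x
      rw [hml x]
      constructor
      · rintro ⟨h1, h2, h3, h4, h5⟩; exact ⟨h1, h2, h3, h4, by omega⟩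
      · rintro ⟨h1, h2, h3, h4, h5⟩
        refine ⟨h1, h2, h3, h4, ?_⟩
        rcases lt_or_ge (d / x) i with hlt | hge
        · exact hlt
        · exfalso
          have hdxi : d / x = i := by omega
          have hxy : x * (d / x) = d := Int.mul_ediv_cancel' h4
          rw [hdxi] at hxy
          exact hndvd ⟨x, by linarith [mul_comm x i]⟩
    exact ih (by omega) hps hpl hms' hml'
  | case3 i small large h =>
    intro hi1 hps hpl hms hml
    rw [not_le] at h
    refine ⟨hps, hpl, ?_, ?_⟩
    · intro x
      rw [hms x]
      constructor
      · rintro ⟨h1, h2, h3, h4⟩; exact ⟨h1, h3, h4⟩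
      · rintro ⟨h1, h3, h4⟩
        refine ⟨h1, ?_, h3, h4⟩
        nlinarith
    · intro x
      rw [hml x]
      constructor
      · rintro ⟨h1, h2, h3, h4, h5⟩; exact ⟨h1, h2, h3, h4⟩
      · rintro ⟨h1, h2, h3, h4⟩
        refine ⟨h1, h2, h3, h4, ?_⟩
        have hx0 : (0:Int) < x := by omega
        have hxy : x * (d / x) = d := Int.mul_ediv_cancel' h4
        have hy1 : 1 ≤ d / x := by nlinarith
        have hyx : d / x < x := by nlinarith
        nlinarith

-- two strictly increasing lists with the same members are equal
lemma sorted_lt_ext (l1 l2 : List Int) (h1 : l1.Pairwise (· < ·)) (h2 : l2.Pairwise (· < ·))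
    (hmem : ∀ x, x ∈ l1 ↔ x ∈ l2) : l1 = l2 := by
  have nd1 : l1.Nodup := h1.imp (fun h => ne_of_lt h)
  have nd2 : l2.Nodup := h2.imp (fun h => ne_of_lt h)
  exact ((List.perm_ext_iff_of_nodup nd1 nd2).mpr hmem).eq_of_pairwise
    (fun a b _ _ h h' => le_antisymm h h') (h1.imp le_of_lt) (h2.imp le_of_lt)

lemma altDivisors_eq (d : Int) :
    altDivisors d = (PySem.List.pyRange 2 (d+1) 1).filter (fun i => PySem.Int.mod d i == 0) := by
  by_cases hd : d < 2
  · have hr : PySem.List.pyRange 2 (d+1) 1 = [] := by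
      rw [PySem.List.pyRange_one]
      have : (d + 1 - 2).toNat = 0 := by omega
      simp [this]
    simp [altDivisors, hd, hr]
  · rw [not_lt] at hd
    have hspec := altDivAux_spec d hd 1 [] [] le_rfl (List.Pairwise.nil) (List.Pairwise.nil)
      (by intro x; simp; omega)
      (by
        intro x
        simp only [List.not_mem_nil, false_iff]
        rintro ⟨hx1, hxx, hxd, hdvd, hlt⟩
        have hx0 : 0 < x := by omega
        have := cofactor_eq d x hx0 hdvd
        nlinarith)
    obtain ⟨hps, hpl, hms, hml⟩ := hspec
    apply sorted_lt_ext
    · -- pairwise of small ++ large.reverse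
      rw [altDivisors, if_neg (by omega)]
      rw [List.pairwise_append]
      refine ⟨hps, List.pairwise_reverse.mpr hpl, ?_⟩
      intro a ha b hb
      rw [List.mem_reverse] at hb
      obtain ⟨ha1, haa, -⟩ := (hms a).mp ha
      obtain ⟨hb1, hbb, -⟩ := (hml b).mp hb
      nlinarith
    · exact ((PySem.List.pairwise_lt_pyRange_one (a := 2) (b := d+1)).filter _)
    · intro x
      rw [altDivisors, if_neg (by omega)]
      rw [List.mem_append, List.mem_reverse, hms x, hml x, List.mem_filter,
        PySem.List.mem_pyRange_one]
      constructor
      · rintro (⟨hx1, hxx, hdvd⟩ | ⟨hx1, hxx, hxd, hdvd⟩)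
        · refine ⟨⟨by omega, by nlinarith⟩, ?_⟩
          rw [PySem.Int.mod_eq_emod_of_pos (by omega)]
          simpa using Int.emod_eq_zero_of_dvd hdvd
        · refine ⟨⟨by omega, by omega⟩, ?_⟩
          rw [PySem.Int.mod_eq_emod_of_pos (by omega)]
          simpa using Int.emod_eq_zero_of_dvd hdvd
      · rintro ⟨⟨hx2, hxd⟩, hmod⟩
        rw [PySem.Int.mod_eq_emod_of_pos (by omega)] at hmod
        have hdvd : x ∣ d := Int.dvd_of_emod_eq_zero (by simpa using hmod)
        rcases le_or_gt (x * x) d with hxx | hxx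
        · exact Or.inl ⟨by omega, hxx, hdvd⟩
        · exact Or.inr ⟨by omega, hxx, by omega, hdvd⟩

-- ===== VERDICT (by name: the statement is the Claim_ definition above) =====
theorem factorize_distances_spec : Claim_equal_factorize_distances := by
  intro distances _
  show _ = _
  unfold factorize_distances factorize_distances_alt
  have hstep :
      (fun (st : PySem.Dict Int Int × PySem.Dict Int (List Int)) d =>
        let inner := (PySem.List.pyRange 2 (d+1) 1).foldl
          (fun (st2 : List Int × PySem.Dict Int Int) i =>
            if PySem.Int.mod d i == 0 then
              (st2.1 ++ [i], st2.2.insert i (st2.2.getD i 0 + 1))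
            else st2)
          ([], st.1)
        (inner.2, st.2.insert d inner.1))
      = (fun (st : PySem.Dict Int Int × PySem.Dict Int (List Int)) d =>
        let divs := altDivisors d
        (divs.foldl (fun c i => c.insert i (c.getD i 0 + 1)) st.1, st.2.insert d divs)) := by
    funext st d
    simp only [innerA_eq, altDivisors_eq, List.nil_append]
  rw [hstep]
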